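-- pv_equiv track=rewrite | github.com/Mewash1/algorithmsAndDataStructures | pattern_search/KMP_search.py | make_prefix_dict
-- ===== SOURCE A (Python) =====
-- def prefix_search(pattern) -> int:
--     if len(pattern) == 0:
--         return -1
--     id1 = 0
--     id2 = len(pattern) - 1
--     while id2 != 0:
--         id1 += 1
--         prefix = pattern[:id2]
--         sufix = pattern[id1:]
--         if prefix == sufix:
--             return len(prefix)
--         id2 -= 1
--     return 0
--
-- def make_prefix_dict(pattern):
--     prefix_dict = {}
--     prefix_dict[''] = -1
--     for i in range(1, len(pattern)+1):
--         prefix = pattern[:i]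
--         outcome = prefix_search(prefix)
--         if i < len(pattern):
--             wrong_letter = pattern[i]
--             match_letter = prefix[outcome]
--             if wrong_letter == match_letter:
--                 if outcome == 0:
--                     outcome2 = -1
--                 else:
--                     outcome2 = prefix_dict[prefix[:outcome]]
--
--                 outcome = outcome2
--         prefix_dict[prefix] = outcome
--     return prefix_dict
-- ===== SOURCE B (Python) =====
-- def make_prefix_dict(pattern):
--     # One-pass KMP failure-function computation (weak borders), then the
--     # strong-border adjustment, instead of recomputing every border by
--     # brute force for every prefix.
--     n = len(pattern)
--     weak = [0] * (n + 1)   # weak[i] = longest proper border of pattern[:i]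
--     k = 0
--     for i in range(1, n):
--         while k > 0 and pattern[i] != pattern[k]:
--             k = weak[k]
--         if pattern[i] == pattern[k]:
--             k += 1
--         weak[i + 1] = k
--     strong = [-1] * (n + 1)
--     for i in range(1, n + 1):
--         b = weak[i]
--         if i < n and pattern[i] == pattern[b]:
--             strong[i] = strong[b]
--         else:
--             strong[i] = b
--     return {pattern[:i]: strong[i] for i in range(n + 1)}
-- ===== Notes on version B (the rewrite author's own statement) =====
-- stated objective: faster
-- what changed: Replaces per-prefix brute-force border search (for every prefix, try every border length and compare slices) and dict-driven strong adjustment by the classic one-pass KMP failure-function recurrence over the whole pattern, followed by an array-based strong-border pass; the dict is then built in one comprehension.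
import Mathlib
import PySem

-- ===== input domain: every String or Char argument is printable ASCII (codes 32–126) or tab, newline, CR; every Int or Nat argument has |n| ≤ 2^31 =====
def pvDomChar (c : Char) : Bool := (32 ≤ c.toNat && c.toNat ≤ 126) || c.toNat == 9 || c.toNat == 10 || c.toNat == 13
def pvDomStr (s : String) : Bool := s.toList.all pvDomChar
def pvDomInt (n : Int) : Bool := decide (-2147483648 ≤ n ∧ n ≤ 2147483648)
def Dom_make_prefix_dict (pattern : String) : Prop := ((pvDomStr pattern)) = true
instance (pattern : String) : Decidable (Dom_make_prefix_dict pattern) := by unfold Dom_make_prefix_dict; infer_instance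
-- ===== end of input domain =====

-- B replaces A's per-prefix brute-force border search by the one-pass KMP
-- failure-function recurrence plus an array-based strong-border pass (faster).


-- ===== PORT A =====
-- the 'while id2 != 0' loop of prefix_search; structural recursion on id2
def psLoop (s : List Char) (id1 : Nat) : Nat → Int
  | 0 => 0
  | id2 + 1 =>
      -- id1 += 1; prefix = pattern[:id2]; sufix = pattern[id1:]
      let pre := PySem.List.slice s none (some ((id2 + 1 : Nat) : Int))
      let suf := PySem.List.slice s (some ((id1 + 1 : Nat) : Int)) none
      if pre = suf then (pre.length : Int) else psLoop s (id1 + 1) id2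

-- prefix_search, over the code points of the string (Chars bridge: its slices/len are list ops)
def prefix_search (s : List Char) : Int :=
  if s.length = 0 then -1
  else psLoop s 0 (s.length - 1)

-- the body of A's 'for i in range(1, len(pattern)+1)' loop
def prefixStep (cs : List Char) (d : PySem.Dict String Int) (i : Int) : PySem.Dict String Int :=
  let pre := PySem.List.slice cs none (some i)            -- pattern[:i]
  let outcome := prefix_search pre
  let outcome : Int :=
    if i < (cs.length : Int) then
      let wrong := PySem.List.pyGetD cs i ' '             -- pattern[i], in range: 1 ≤ i < len
      let matchL := PySem.List.pyGetD pre outcome ' '     -- prefix[outcome], in range: 0 ≤ outcome < i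
      if wrong = matchL then
        (if outcome = 0 then (-1 : Int)
         -- prefix_dict[prefix[:outcome]]: the key is always present (KeyError impossible)
         else d.getD (String.ofList (PySem.List.slice pre none (some outcome))) 0)
      else outcome
    else outcome
  d.insert (String.ofList pre) outcome

def make_prefix_dict (pattern : String) : List (String × Int) :=
  let cs := pattern.toList
  -- prefix_dict = {}; prefix_dict[''] = -1
  let d0 : PySem.Dict String Int := PySem.Dict.empty.insert "" (-1)
  ((PySem.List.pyRange 1 ((cs.length : Int) + 1) 1).foldl (prefixStep cs) d0).items

-- ===== PORT B =====
-- the 'while k > 0 and pattern[i] != pattern[k]' loop; fuel (≥ k at every call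
-- site) only makes the loop total, it is never exhausted on reachable states
def kmpShrink (cs : List Char) (weak : List Nat) (c : Char) : Nat → Nat → Nat
  | 0, k => k
  | fuel + 1, k =>
      if 0 < k ∧ cs.getD k ' ' ≠ c then kmpShrink cs weak c fuel (weak.getD k 0)
      else k

-- the body of B's 'for i in range(1, n)' failure-function loop
def kmpStep (cs : List Char) (st : List Nat × Nat) (i : Nat) : List Nat × Nat :=
  let c := cs.getD i ' '
  let k := kmpShrink cs st.1 c st.2 st.2
  let k := if cs.getD k ' ' = c then k + 1 else k
  (st.1.set (i + 1) k, k)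

-- the body of B's 'for i in range(1, n+1)' strong-adjustment loop
def strongStep (cs : List Char) (n : Nat) (weak : List Nat) (st : List Int) (i : Nat) : List Int :=
  let b := weak.getD i 0
  st.set i (if i < n ∧ cs.getD i ' ' = cs.getD b ' ' then st.getD b 0 else (b : Int))

def make_prefix_dict_alt (pattern : String) : List (String × Int) :=
  let cs := pattern.toList
  let n := cs.length
  -- weak = [0]*(n+1); k = 0; for i in range(1, n): …
  let wk := (List.range' 1 (n - 1)).foldl (kmpStep cs) (List.replicate (n + 1) 0, 0)
  let weak := wk.1
  -- strong = [-1]*(n+1); for i in range(1, n+1): …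
  let strong := (List.range' 1 n).foldl (strongStep cs n weak) (List.replicate (n + 1) (-1))
  -- {pattern[:i]: strong[i] for i in range(n+1)}   (pattern[:i] = take i)
  let d := (List.range (n + 1)).foldl (fun (d : PySem.Dict String Int) i =>
      d.insert (String.ofList (cs.take i)) (strong.getD i 0)) PySem.Dict.empty
  d.items

-- ===== PRECONDITION & SPEC =====
def Spec_make_prefix_dict (pattern : String) (out : List (String × Int)) : Prop := out = make_prefix_dict_alt pattern
instance (pattern : String) (out : List (String × Int)) : Decidable (Spec_make_prefix_dict pattern out) := by unfold Spec_make_prefix_dict; infer_instance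

-- ===== CLAIM (what is proved, stated in full; the proofs are below) =====
def Claim_equal_make_prefix_dict : Prop := ∀ (pattern : String), Dom_make_prefix_dict pattern → Spec_make_prefix_dict pattern (make_prefix_dict pattern)

-- ===== LEMMAS AND PROOFS =====

-- 'k is a border width of s': the k-prefix equals the k-suffix
abbrev bord (s : List Char) (k : Nat) : Prop := s.take k = s.drop (s.length - k)

-- longest proper border width of s (0 for s = [] or |s| = 1)
def pf (s : List Char) : Nat := Nat.findGreatest (fun k => bord s k) (s.length - 1)

lemma bord_zero (s : List Char) : bord s 0 := by simp [bord]

lemma pf_le (s : List Char) : pf s ≤ s.length - 1 := Nat.findGreatest_le _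

lemma pf_bord (s : List Char) : bord s (pf s) :=
  Nat.findGreatest_spec (Nat.zero_le _) (bord_zero s)

lemma pf_take_lt' (cs : List Char) {k : Nat} (hk : 1 ≤ k) : pf (cs.take k) < k := by
  have h := pf_le (cs.take k)
  have : (cs.take k).length ≤ k := by simp
  omega

lemma pf_take_lt (cs : List Char) (m : Nat) : pf (cs.take (m + 1)) < m + 1 :=
  pf_take_lt' cs (by omega)

-- the strong failure value A stores for the prefix of length m
def strongV (cs : List Char) : Nat → Int
  | 0 => -1
  | m + 1 =>
      let w := pf (cs.take (m + 1))
      if m + 1 < cs.length ∧ cs.getD (m + 1) ' ' = cs.getD w ' '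
      then strongV cs w
      else (w : Int)
  decreasing_by exact pf_take_lt cs m

lemma strongV_zero (cs : List Char) : strongV cs 0 = -1 := by simp [strongV]

lemma strongV_succ (cs : List Char) (m : Nat) :
    strongV cs (m + 1) =
      if m + 1 < cs.length ∧ cs.getD (m + 1) ' ' = cs.getD (pf (cs.take (m + 1))) ' '
      then strongV cs (pf (cs.take (m + 1)))
      else (pf (cs.take (m + 1)) : Int) := by
  rw [strongV]

lemma bord_take {s : List Char} {j k : Nat} (hj : bord s j) (hk : bord s k)
    (hkj : k ≤ j) (hjl : j ≤ s.length) : bord (s.take j) k := by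
  unfold bord at *
  have hlen : (s.take j).length = j := by simp [hjl]
  rw [hlen, List.take_take, min_eq_left hkj, hj, List.drop_drop]
  have harith : s.length - j + (j - k) = s.length - k := by omega
  rw [harith, ← hk]

lemma bord_of_bord_take {s : List Char} {j k : Nat} (hj : bord s j) (hjl : j ≤ s.length)
    (h : bord (s.take j) k) (hkj : k ≤ j) : bord s k := by
  unfold bord at *
  have hlen : (s.take j).length = j := by simp [hjl]
  rw [hlen, List.take_take, min_eq_left hkj, hj, List.drop_drop] at h
  have harith : s.length - j + (j - k) = s.length - k := by omega
  rw [harith] at h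
  exact h

lemma bord_append {s : List Char} {c : Char} {j : Nat} (hj : j < s.length) :
    bord (s ++ [c]) (j + 1) ↔ (bord s j ∧ s.getD j ' ' = c) := by
  unfold bord
  have hlen : (s ++ [c]).length = s.length + 1 := by simp
  rw [hlen]
  have h1 : s.length + 1 - (j + 1) = s.length - j := by omega
  rw [h1, List.take_append_of_le_length (by omega),
      List.drop_append_of_le_length (by omega), List.take_add_one,
      List.getElem?_eq_getElem hj]
  simp only [Option.toList_some]
  constructor
  · intro h
    have hl : (List.take j s).length = (List.drop (s.length - j) s).length := by
      simp; omega
    obtain ⟨h2, h3⟩ := List.append_inj h hl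
    refine ⟨h2, ?_⟩
    rw [List.getD_eq_getElem _ _ hj]
    simpa using h3
  · rintro ⟨h2, h3⟩
    rw [List.getD_eq_getElem _ _ hj] at h3
    rw [h2, h3]

lemma psLoop_spec (s : List Char) : ∀ m, m ≤ s.length - 1 →
    psLoop s (s.length - 1 - m) m = (Nat.findGreatest (fun k => bord s k) m : Int) := by
  intro m
  induction m with
  | zero => intro _; simp [psLoop]
  | succ m ih =>
    intro hm
    have hlen : m + 2 ≤ s.length := by omega
    simp only [psLoop]
    rw [PySem.List.slice_to_natCast, PySem.List.slice_from_natCast]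
    have e1 : s.length - 1 - (m + 1) + 1 = s.length - (m + 1) := by omega
    rw [e1]
    by_cases h : bord s (m + 1)
    · rw [if_pos h, Nat.findGreatest_eq h]
      have hl : (s.take (m + 1)).length = m + 1 := by rw [List.length_take]; omega
      rw [hl]
    · rw [if_neg h, Nat.findGreatest_of_not h]
      have e2 : s.length - (m + 1) = s.length - 1 - m := by omega
      rw [e2]
      exact ih (by omega)

lemma prefix_search_eq {s : List Char} (h : s ≠ []) : prefix_search s = ((pf s : Nat) : Int) := by
  have hl : ¬ s.length = 0 := by simpa using h
  rw [prefix_search, if_neg hl, pf]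
  have h0 : s.length - 1 - (s.length - 1) = 0 := by omega
  have := psLoop_spec s (s.length - 1) (le_refl _)
  rw [h0] at this
  exact this

lemma getD_take {cs : List Char} {i k : Nat} (h : k < i) (d : Char) :
    (cs.take i).getD k d = cs.getD k d := by
  rw [List.getD_eq_getElem?_getD, List.getD_eq_getElem?_getD, List.getElem?_take, if_pos h]

lemma take_succ_eq {cs : List Char} {i : Nat} (h : i < cs.length) :
    cs.take (i + 1) = cs.take i ++ [cs.getD i ' '] := by
  rw [List.take_add_one, List.getElem?_eq_getElem h, List.getD_eq_getElem _ _ h]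
  simp

lemma getD_replicate {α : Type} (n j : Nat) (a : α) : (List.replicate n a).getD j a = a := by
  rw [List.getD_eq_getElem?_getD, List.getElem?_replicate]
  split <;> rfl

lemma getD_replicate_lt {α : Type} (n j : Nat) (a d : α) (h : j < n) :
    (List.replicate n a).getD j d = a := by
  rw [List.getD_eq_getElem?_getD, List.getElem?_replicate, if_pos h]
  rfl

lemma shrink_spec (cs : List Char) (weak : List Nat) (c : Char) (i : Nat)
    (_hi1 : 1 ≤ i) (hil : i ≤ cs.length)
    (hw : ∀ j, 1 ≤ j → j < i → weak.getD j 0 = pf (cs.take j)) :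
    ∀ fuel k, k ≤ fuel → k < i → bord (cs.take i) k →
      (∀ b, b < i → bord (cs.take i) b → cs.getD b ' ' = c → b ≤ k) →
      (kmpShrink cs weak c fuel k < i ∧ bord (cs.take i) (kmpShrink cs weak c fuel k)) ∧
      (cs.getD (kmpShrink cs weak c fuel k) ' ' = c ∨ kmpShrink cs weak c fuel k = 0) ∧
      (∀ b, b < i → bord (cs.take i) b → cs.getD b ' ' = c → b ≤ kmpShrink cs weak c fuel k) := by
  intro fuel
  induction fuel with
  | zero =>
    intro k hk hki hbk hmax
    have hk0 : k = 0 := Nat.le_zero.mp hk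
    subst hk0
    simp only [kmpShrink]
    exact ⟨⟨by omega, bord_zero _⟩, Or.inr (by trivial), hmax⟩
  | succ fuel ih =>
    intro k hk hki hbk hmax
    simp only [kmpShrink]
    by_cases hc : 0 < k ∧ cs.getD k ' ' ≠ c
    · rw [if_pos hc]
      have hkw : weak.getD k 0 = pf (cs.take k) := hw k hc.1 hki
      have hlt : pf (cs.take k) < k := pf_take_lt' cs hc.1
      have hleni : (cs.take i).length = i := by rw [List.length_take]; omega
      have htk : (cs.take i).take k = cs.take k := by
        rw [List.take_take, min_eq_left (le_of_lt hki)]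
      have hbord_tk : bord (cs.take i) (pf (cs.take k)) :=
        bord_of_bord_take hbk (by rw [hleni]; omega)
          (by rw [htk]; exact pf_bord _) (le_of_lt hlt)
      have hmax' : ∀ b, b < i → bord (cs.take i) b → cs.getD b ' ' = c → b ≤ pf (cs.take k) := by
        intro b hbi hbb hbc
        have hble : b ≤ k := hmax b hbi hbb hbc
        have hbne : b ≠ k := by rintro rfl; exact hc.2 hbc
        have hblt : b < k := lt_of_le_of_ne hble hbne
        have hbb' : bord ((cs.take i).take k) b :=
          bord_take hbk hbb (le_of_lt hblt) (by rw [hleni]; omega)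
        rw [htk] at hbb'
        unfold pf
        exact Nat.le_findGreatest (by rw [List.length_take]; omega) hbb'
      have := ih (weak.getD k 0) (by rw [hkw]; omega) (by rw [hkw]; omega)
        (by rw [hkw]; exact hbord_tk) (by rw [hkw]; exact hmax')
      exact this
    · rw [if_neg hc]
      push Not at hc
      refine ⟨⟨hki, hbk⟩, ?_, hmax⟩
      by_cases hk0 : k = 0
      · exact Or.inr hk0
      · exact Or.inl (hc (Nat.pos_of_ne_zero hk0))

lemma pf_succ (cs : List Char) (weak : List Nat) (i : Nat)
    (hi1 : 1 ≤ i) (hil : i < cs.length)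
    (hw : ∀ j, 1 ≤ j → j < i → weak.getD j 0 = pf (cs.take j)) :
    pf (cs.take (i + 1)) =
      (if cs.getD (kmpShrink cs weak (cs.getD i ' ') (pf (cs.take i)) (pf (cs.take i))) ' ' = cs.getD i ' '
       then kmpShrink cs weak (cs.getD i ' ') (pf (cs.take i)) (pf (cs.take i)) + 1
       else kmpShrink cs weak (cs.getD i ' ') (pf (cs.take i)) (pf (cs.take i))) := by
  have hleni : (cs.take i).length = i := by rw [List.length_take]; omega
  have hk0lt : pf (cs.take i) < i := pf_take_lt' cs hi1
  have hinit_max : ∀ b, b < i → bord (cs.take i) b → cs.getD b ' ' = cs.getD i ' ' →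
      b ≤ pf (cs.take i) := by
    intro b hbi hbb _
    unfold pf
    exact Nat.le_findGreatest (by rw [List.length_take]; omega) hbb
  obtain ⟨⟨hrlt, hrbord⟩, hror, hrmax⟩ :=
    shrink_spec cs weak (cs.getD i ' ') i hi1 (le_of_lt hil) hw (pf (cs.take i)) (pf (cs.take i))
      (le_refl _) hk0lt (pf_bord _) hinit_max
  set r := kmpShrink cs weak (cs.getD i ' ') (pf (cs.take i)) (pf (cs.take i)) with hr
  have htake : cs.take (i + 1) = cs.take i ++ [cs.getD i ' '] := take_succ_eq hil
  have hlent : (cs.take (i + 1)).length = i + 1 := by rw [List.length_take]; omega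
  by_cases hm : cs.getD r ' ' = cs.getD i ' '
  · rw [if_pos hm]
    have hb1 : bord (cs.take (i + 1)) (r + 1) := by
      rw [htake]
      exact (bord_append (by rw [hleni]; omega)).mpr
        ⟨hrbord, by rw [getD_take hrlt]; exact hm⟩
    have hle1 : r + 1 ≤ pf (cs.take (i + 1)) := by
      unfold pf
      exact Nat.le_findGreatest (by rw [hlent]; omega) hb1
    have hle2 : pf (cs.take (i + 1)) ≤ r + 1 := by
      rcases Nat.eq_zero_or_pos (pf (cs.take (i + 1))) with h0 | hpos
      · omega
      · obtain ⟨m, hm'⟩ : ∃ m, pf (cs.take (i + 1)) = m + 1 :=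
          ⟨pf (cs.take (i + 1)) - 1, by omega⟩
        have hbord : bord (cs.take (i + 1)) (m + 1) := by rw [← hm']; exact pf_bord _
        have hmle : m + 1 ≤ i := by
          have := pf_le (cs.take (i + 1)); rw [hlent] at this; omega
        rw [htake] at hbord
        obtain ⟨hb, hgc⟩ := (bord_append (by rw [hleni]; omega)).mp hbord
        rw [getD_take (show m < i by omega)] at hgc
        have := hrmax m (by omega) hb hgc
        omega
    omega
  · rw [if_neg hm]
    have hr0 : r = 0 := by
      rcases hror with h | h
      · exact absurd h hm
      · exact h
    rcases Nat.eq_zero_or_pos (pf (cs.take (i + 1))) with h0 | hpos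
    · rw [h0, hr0]
    · exfalso
      obtain ⟨m, hm'⟩ : ∃ m, pf (cs.take (i + 1)) = m + 1 :=
        ⟨pf (cs.take (i + 1)) - 1, by omega⟩
      have hbord : bord (cs.take (i + 1)) (m + 1) := by rw [← hm']; exact pf_bord _
      have hmle : m + 1 ≤ i := by
        have := pf_le (cs.take (i + 1)); rw [hlent] at this; omega
      rw [htake] at hbord
      obtain ⟨hb, hgc⟩ := (bord_append (by rw [hleni]; omega)).mp hbord
      rw [getD_take (show m < i by omega)] at hgc
      have hmr : m ≤ r := hrmax m (by omega) hb hgc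
      have hm0 : m = 0 := by omega
      rw [hm0] at hgc
      rw [hr0] at hm
      exact hm hgc

-- B's failure-function loop invariant
lemma weak_loop (cs : List Char) : ∀ m, m ≤ cs.length - 1 →
    ((List.range' 1 m).foldl (kmpStep cs) (List.replicate (cs.length + 1) 0, 0)).1.length
        = cs.length + 1 ∧
    (∀ j, j ≤ m + 1 →
      ((List.range' 1 m).foldl (kmpStep cs) (List.replicate (cs.length + 1) 0, 0)).1.getD j 0
        = pf (cs.take j)) ∧
    ((List.range' 1 m).foldl (kmpStep cs) (List.replicate (cs.length + 1) 0, 0)).2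
        = pf (cs.take (m + 1)) := by
  intro m
  induction m with
  | zero =>
    intro _
    simp only [List.range'_zero, List.foldl_nil]
    refine ⟨by simp, ?_, ?_⟩
    · intro j hj
      have h0 : pf (cs.take j) = 0 := by
        unfold pf
        have he : (cs.take j).length - 1 = 0 := by rw [List.length_take]; omega
        rw [he]
        exact Nat.findGreatest_zero
      rw [h0, getD_replicate]
    · have h0 : pf (cs.take 1) = 0 := by
        unfold pf
        have he : (cs.take 1).length - 1 = 0 := by rw [List.length_take]; omega
        rw [he]
        exact Nat.findGreatest_zero
      rw [h0]
  | succ m ih =>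
    intro hm
    obtain ⟨hlen, hgd, hk⟩ := ih (by omega)
    rw [List.range'_concat, List.foldl_append]
    simp only [List.foldl_cons, List.foldl_nil]
    have hone : 1 + 1 * m = m + 1 := by omega
    rw [hone]
    set st := (List.range' 1 m).foldl (kmpStep cs) (List.replicate (cs.length + 1) 0, 0) with hst
    simp only [kmpStep]
    rw [hk]
    have hps := pf_succ cs st.1 (m + 1) (by omega) (by omega)
      (fun j h1 h2 => hgd j (by omega))
    refine ⟨by rw [List.length_set]; exact hlen, ?_, ?_⟩
    · intro j hj
      by_cases hje : j = m + 1 + 1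
      · subst hje
        rw [List.getD_eq_getElem?_getD,
            List.getElem?_set_self (by rw [hlen]; omega), Option.getD_some]
        exact hps.symm
      · rw [List.getD_eq_getElem?_getD, List.getElem?_set_ne (by omega),
            ← List.getD_eq_getElem?_getD]
        exact hgd j (by omega)
    · exact hps.symm

-- B's strong-adjustment loop invariant
lemma strong_loop (cs : List Char) (weak : List Nat)
    (hw : ∀ j, 1 ≤ j → j ≤ cs.length → weak.getD j 0 = pf (cs.take j)) :
    ∀ m, m ≤ cs.length →
    ((List.range' 1 m).foldl (strongStep cs cs.length weak)
        (List.replicate (cs.length + 1) (-1))).length = cs.length + 1 ∧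
    (∀ j, j ≤ m →
      ((List.range' 1 m).foldl (strongStep cs cs.length weak)
          (List.replicate (cs.length + 1) (-1))).getD j 0 = strongV cs j) := by
  intro m
  induction m with
  | zero =>
    intro _
    simp only [List.range'_zero, List.foldl_nil]
    refine ⟨by simp, ?_⟩
    intro j hj
    have h0 : j = 0 := by omega
    subst h0
    rw [strongV_zero, getD_replicate_lt _ _ _ _ (by omega)]
  | succ m ih =>
    intro hm
    obtain ⟨hlen, hgd⟩ := ih (by omega)
    rw [List.range'_concat, List.foldl_append]
    simp only [List.foldl_cons, List.foldl_nil]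
    have hone : 1 + 1 * m = m + 1 := by omega
    rw [hone]
    set st := (List.range' 1 m).foldl (strongStep cs cs.length weak)
      (List.replicate (cs.length + 1) (-1)) with hst
    simp only [strongStep]
    have hb : weak.getD (m + 1) 0 = pf (cs.take (m + 1)) := hw (m + 1) (by omega) (by omega)
    have hblt : pf (cs.take (m + 1)) < m + 1 := pf_take_lt cs m
    refine ⟨by rw [List.length_set]; exact hlen, ?_⟩
    intro j hj
    by_cases hje : j = m + 1
    · subst hje
      rw [List.getD_eq_getElem?_getD,
          List.getElem?_set_self (by rw [hlen]; omega), Option.getD_some]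
      rw [hb, hgd (pf (cs.take (m + 1))) (by omega)]
      exact (strongV_succ cs m).symm
    · rw [List.getD_eq_getElem?_getD, List.getElem?_set_ne (by omega),
          ← List.getD_eq_getElem?_getD]
      exact hgd j (by omega)

-- the common value of both programs
def AItems (cs : List Char) (m : Nat) : List (String × Int) :=
  ("", -1) :: (List.range m).map (fun j => (String.ofList (cs.take (j + 1)), strongV cs (j + 1)))

lemma ofList_nil : String.ofList ([] : List Char) = "" := rfl

lemma ofList_inj {a b : List Char} (h : String.ofList a = String.ofList b) : a = b := by
  have := congrArg String.toList h
  simpa using this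

lemma AItems_keys_nodup (cs : List Char) (m : Nat) (hm : m ≤ cs.length) :
    ((AItems cs m).map Prod.fst).Nodup := by
  unfold AItems
  rw [List.map_cons, List.map_map]
  refine List.nodup_cons.mpr ⟨?_, ?_⟩
  · intro hmem
    rw [List.mem_map] at hmem
    obtain ⟨j, hj, hje⟩ := hmem
    rw [List.mem_range] at hj
    have htl : cs.take (j + 1) = [] := ofList_inj (show String.ofList _ = String.ofList [] from hje)
    rcases List.take_eq_nil_iff.mp htl with h | h
    · omega
    · rw [h] at hm; simp at hm; omega
  · refine List.Nodup.map_on ?_ List.nodup_range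
    intro x hx y hy hxy
    rw [List.mem_range] at hx hy
    have he : cs.take (x + 1) = cs.take (y + 1) := ofList_inj hxy
    have hlx : (cs.take (x + 1)).length = x + 1 := by rw [List.length_take]; omega
    have hly : (cs.take (y + 1)).length = y + 1 := by rw [List.length_take]; omega
    rw [he, hly] at hlx
    omega

lemma AItems_getD (cs : List Char) (m : Nat) (hm : m ≤ cs.length)
    (d : PySem.Dict String Int) (hd : d.items = AItems cs m) :
    ∀ k, k ≤ m → d.getD (String.ofList (cs.take k)) 0 = strongV cs k := by
  intro k hk
  have hnd : d.keys.Nodup := by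
    have hkeys : d.keys = (AItems cs m).map Prod.fst := by
      simp only [PySem.Dict.keys]; rw [hd]
    rw [hkeys]; exact AItems_keys_nodup cs m hm
  rcases Nat.eq_zero_or_pos k with h0 | hpos
  · subst h0
    have hmem : (String.ofList (cs.take 0), (-1 : Int)) ∈ d.items := by
      rw [hd]; unfold AItems
      rw [List.take_zero, ofList_nil]
      exact List.mem_cons_self
    rw [strongV_zero]
    exact PySem.Dict.getD_of_mem_items d hmem hnd 0
  · obtain ⟨t, rfl⟩ : ∃ t, k = t + 1 := ⟨k - 1, by omega⟩
    have hmem : (String.ofList (cs.take (t + 1)), strongV cs (t + 1)) ∈ d.items := by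
      rw [hd]; unfold AItems
      exact List.mem_cons_of_mem _
        (List.mem_map_of_mem (List.mem_range.mpr (by omega)))
    exact PySem.Dict.getD_of_mem_items d hmem hnd 0

lemma AItems_fresh (cs : List Char) (m : Nat) (hm : m + 1 ≤ cs.length)
    (d : PySem.Dict String Int) (hd : d.items = AItems cs m) :
    d.contains (String.ofList (cs.take (m + 1))) = false := by
  have hkeys : d.keys = (AItems cs m).map Prod.fst := by
    simp only [PySem.Dict.keys]; rw [hd]
  rw [PySem.Dict.contains_eq_decide_mem_keys]
  apply decide_eq_false
  intro hmem
  rw [hkeys] at hmem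
  unfold AItems at hmem
  rw [List.map_cons, List.map_map] at hmem
  have hlen1 : (cs.take (m + 1)).length = m + 1 := by rw [List.length_take]; omega
  rcases List.mem_cons.mp hmem with h | h
  · have htl : cs.take (m + 1) = [] := ofList_inj (show String.ofList _ = String.ofList [] from h)
    rw [htl] at hlen1
    simp at hlen1
  · rw [List.mem_map] at h
    obtain ⟨j, hj, hje⟩ := h
    rw [List.mem_range] at hj
    have he : cs.take (j + 1) = cs.take (m + 1) := ofList_inj hje
    have hlj : (cs.take (j + 1)).length = j + 1 := by rw [List.length_take]; omega
    rw [he, hlen1] at hlj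
    omega

-- A's main loop invariant
lemma A_loop (cs : List Char) : ∀ m, m ≤ cs.length →
    ((List.range m).foldl (fun d j => prefixStep cs d ((j + 1 : Nat) : Int))
        (PySem.Dict.empty.insert "" (-1))).items = AItems cs m := by
  intro m
  induction m with
  | zero => intro _; rfl
  | succ m ih =>
    intro hm
    rw [List.range_succ, List.foldl_append]
    simp only [List.foldl_cons, List.foldl_nil]
    set d := (List.range m).foldl (fun d j => prefixStep cs d ((j + 1 : Nat) : Int))
      (PySem.Dict.empty.insert "" (-1)) with hdd
    have hd : d.items = AItems cs m := ih (by omega)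
    simp only [prefixStep]
    rw [PySem.List.slice_to_natCast]
    have hne : cs.take (m + 1) ≠ [] := by
      intro h
      rcases List.take_eq_nil_iff.mp h with h | h
      · omega
      · rw [h] at hm; simp at hm
    rw [prefix_search_eq hne]
    set w := pf (cs.take (m + 1)) with hwdef
    have hwlt : w < m + 1 := pf_take_lt cs m
    rw [PySem.List.pyGetD_natCast, PySem.List.pyGetD_natCast, getD_take hwlt,
        PySem.List.slice_to_natCast, List.take_take, min_eq_left (le_of_lt hwlt)]
    simp only [Nat.cast_lt, Nat.cast_eq_zero]
    have hv : (if m + 1 < cs.length then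
        (if cs.getD (m + 1) ' ' = cs.getD w ' ' then
          (if w = 0 then (-1 : Int) else d.getD (String.ofList (cs.take w)) 0)
         else (w : Int))
        else (w : Int)) = strongV cs (m + 1) := by
      rw [strongV_succ, ← hwdef]
      by_cases h1 : m + 1 < cs.length
      · rw [if_pos h1]
        by_cases h2 : cs.getD (m + 1) ' ' = cs.getD w ' '
        · have h12 : m + 1 < cs.length ∧ cs.getD (m + 1) ' ' = cs.getD w ' ' := ⟨h1, h2⟩
          rw [if_pos h2, if_pos h12]
          by_cases h3 : w = 0
          · rw [if_pos h3, h3, strongV_zero]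
          · rw [if_neg h3]
            exact AItems_getD cs m (by omega) d hd w (by omega)
        · rw [if_neg h2, if_neg (by intro h; exact h2 h.2)]
      · rw [if_neg h1, if_neg (by intro h; exact h1 h.1)]
    rw [hv]
    rw [PySem.Dict.items_insert_of_not_contains d _ (AItems_fresh cs m hm d hd), hd]
    unfold AItems
    rw [List.range_succ, List.map_append]
    rfl

lemma pyRange_map (n : Nat) :
    PySem.List.pyRange 1 ((n : Int) + 1) 1 = (List.range n).map (fun j => ((j + 1 : Nat) : Int)) := by
  induction n with
  | zero => rfl
  | succ n ih =>
    have hcast : ((n + 1 : Nat) : Int) + 1 = ((n : Int) + 1) + 1 := by push_cast; ring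
    rw [hcast, PySem.List.pyRange_one_succ_right (by omega), ih, List.range_succ, List.map_append]
    simp

lemma A_final (pattern : String) :
    make_prefix_dict pattern = AItems pattern.toList pattern.toList.length := by
  show (List.foldl (prefixStep pattern.toList) (PySem.Dict.empty.insert "" (-1))
      (PySem.List.pyRange 1 ((pattern.toList.length : Int) + 1) 1)).items = _
  rw [pyRange_map, List.foldl_map]
  exact A_loop pattern.toList pattern.toList.length (le_refl _)

lemma B_final (pattern : String) :
    make_prefix_dict_alt pattern = AItems pattern.toList pattern.toList.length := by
  unfold make_prefix_dict_alt
  set cs := pattern.toList with hcs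
  set wk := (List.range' 1 (cs.length - 1)).foldl (kmpStep cs)
    (List.replicate (cs.length + 1) 0, 0) with hwk
  obtain ⟨hwlen, hwgd, -⟩ := weak_loop cs (cs.length - 1) (le_refl _)
  have hwAll : ∀ j, 1 ≤ j → j ≤ cs.length → wk.1.getD j 0 = pf (cs.take j) :=
    fun j _ h2 => hwgd j (by omega)
  set strong := (List.range' 1 cs.length).foldl (strongStep cs cs.length wk.1)
    (List.replicate (cs.length + 1) (-1)) with hstrong
  obtain ⟨hslen, hsgd⟩ := strong_loop cs wk.1 hwAll cs.length (le_refl _)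
  rw [← hstrong] at hsgd
  have hnd : ((List.range (cs.length + 1)).map (fun i => String.ofList (cs.take i))).Nodup := by
    refine List.Nodup.map_on ?_ List.nodup_range
    intro x hx y hy hxy
    rw [List.mem_range] at hx hy
    have he : cs.take x = cs.take y := ofList_inj hxy
    have hlx : (cs.take x).length = x := by rw [List.length_take]; omega
    have hly : (cs.take y).length = y := by rw [List.length_take]; omega
    rw [he, hly] at hlx
    omega
  rw [PySem.Dict.items_foldl_insert_fresh (List.range (cs.length + 1))
    (fun i => String.ofList (cs.take i)) (fun i => strong.getD i 0) PySem.Dict.empty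
    (fun a _ => PySem.Dict.contains_empty _) hnd]
  rw [List.range_succ_eq_map, List.map_cons, List.map_map]
  unfold AItems
  rw [List.take_zero, ofList_nil]
  have h0 : strong.getD 0 0 = -1 := by rw [hsgd 0 (by omega), strongV_zero]
  have hie : (PySem.Dict.empty : PySem.Dict String Int).items = [] := rfl
  rw [hie, List.nil_append, h0]
  congr 1
  apply List.map_congr_left
  intro j hj
  rw [List.mem_range] at hj
  simp only [Function.comp_apply, Nat.succ_eq_add_one]
  rw [hsgd (j + 1) (by omega)]

-- ===== VERDICT (by name: the statement is the Claim_ definition above) =====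
theorem make_prefix_dict_spec : Claim_equal_make_prefix_dict := by
  intro pattern _
  unfold Spec_make_prefix_dict
  rw [A_final, B_final]
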